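-- pv_equiv track=rewrite | github.com/Crazysodaman/Gaia | Move.py | posmakera
-- ===== SOURCE A (Python) =====
-- def posmakera(servo, posa, posb):
--     """
--     :param servo: any
--     :param posa: 1500 is default
--     :param posb: exp 750
--     :return: a list of pos ex: 1500,750,1500
--     """
--     pwm = []
--     for i in range(len(servo)):
--         if i % 2 == 0:
--             pwm.append(posa)
--         else:
--             pwm.append(posb)
--     return pwm
-- ===== SOURCE B (Python) =====
-- def posmakera(servo, posa, posb):
--     pwm = ([posa, posb] * ((len(servo) + 1) // 2))[:len(servo)]
--     return pwm
-- ===== Notes on version B (the rewrite author's own statement) =====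
-- stated objective: idiomatic
-- what changed: Replaces the index loop with its i%2 branch by a repeat-and-truncate construction: [posa, posb] multiplied to cover the length, then sliced to exactly len(servo); list multiplication avoids the per-element Python-level loop and branch.
import Mathlib
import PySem

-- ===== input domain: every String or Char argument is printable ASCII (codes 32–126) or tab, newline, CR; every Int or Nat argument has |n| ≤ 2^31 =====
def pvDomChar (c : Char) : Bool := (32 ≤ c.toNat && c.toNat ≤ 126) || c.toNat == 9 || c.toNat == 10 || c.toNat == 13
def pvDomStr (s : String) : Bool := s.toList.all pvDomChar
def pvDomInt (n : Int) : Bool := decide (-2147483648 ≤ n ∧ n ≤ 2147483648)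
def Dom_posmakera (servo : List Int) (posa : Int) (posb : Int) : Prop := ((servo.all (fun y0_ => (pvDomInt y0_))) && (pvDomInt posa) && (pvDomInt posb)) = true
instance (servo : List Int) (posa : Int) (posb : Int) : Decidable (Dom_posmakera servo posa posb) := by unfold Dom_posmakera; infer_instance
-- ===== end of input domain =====

-- B replaces A's index loop with its i%2 branch by repeat-and-truncate ([posa,posb] * k sliced to length); idiomatic, same cost.

-- ===== PORT A =====
def posmakera (servo : List Int) (posa : Int) (posb : Int) : List Int :=
  (PySem.List.pyRange 0 (servo.length : Int) 1).foldl
    (fun pwm i => pwm ++ [if PySem.Int.mod i 2 = 0 then posa else posb]) []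

-- ===== PORT B =====
-- B: repeat the base pattern [posa, posb] enough times ((len+1)//2), then slice to length.
def posmakera_alt (servo : List Int) (posa : Int) (posb : Int) : List Int :=
  PySem.List.slice
    ((List.replicate (PySem.Int.floordiv ((servo.length : Int) + 1) 2).toNat [posa, posb]).flatten)
    none (some (servo.length : Int))

-- ===== PRECONDITION & SPEC =====
def Spec_posmakera (servo : List Int) (posa : Int) (posb : Int) (out : List Int) : Prop := out = posmakera_alt servo posa posb
instance (servo : List Int) (posa : Int) (posb : Int) (out : List Int) : Decidable (Spec_posmakera servo posa posb out) := by unfold Spec_posmakera; infer_instance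

-- ===== CLAIM (what is proved, stated in full; the proofs are below) =====
def Claim_equal_posmakera : Prop := ∀ (servo : List Int) (posa : Int) (posb : Int), Dom_posmakera servo posa posb → Spec_posmakera servo posa posb (posmakera servo posa posb)

-- ===== LEMMAS AND PROOFS =====

-- alternating list of length n starting with a
def altList (a b : Int) : Nat → List Int
  | 0 => []
  | n + 1 => a :: altList b a n

theorem map_range_eq_alt (a b : Int) (n : Nat) :
    (List.range n).map (fun (k : Nat) => if PySem.Int.mod ((0 : Int) + (k : Int)) 2 = 0 then a else b)
      = altList a b n := by
  induction n generalizing a b with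
  | zero => simp [altList]
  | succ n ih =>
    rw [List.range_succ_eq_map, List.map_cons, List.map_map]
    have h : ((fun (k : Nat) => if PySem.Int.mod ((0 : Int) + (k : Int)) 2 = 0 then a else b) ∘ Nat.succ)
        = fun (k : Nat) => if PySem.Int.mod ((0 : Int) + (k : Int)) 2 = 0 then b else a := by
      funext k
      simp only [Function.comp]
      rw [PySem.Int.mod_eq_emod_of_pos (by omega), PySem.Int.mod_eq_emod_of_pos (by omega)]
      have hc : ((Nat.succ k : Nat) : Int) = (k : Int) + 1 := by push_cast; ring
      rw [hc]
      by_cases hk : ((0 : Int) + (k : Int)) % 2 = 0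
      · rw [if_pos hk, if_neg (by omega)]
      · rw [if_neg hk, if_pos (by omega)]
    rw [h, ih b a]
    have hz : (if PySem.Int.mod ((0 : Int) + ((0 : Nat) : Int)) 2 = 0 then a else b) = a := by
      rw [PySem.Int.mod_eq_emod_of_pos (by omega)]
      norm_num
    rw [hz]
    rfl

theorem take_flatten_eq_alt (a b : Int) (n : Nat) :
    List.take n (List.replicate ((n + 1) / 2) [a, b]).flatten = altList a b n := by
  induction n using Nat.twoStepInduction generalizing a b with
  | zero => simp [altList]
  | one => simp [altList]
  | more n ih _ =>
    have h2 : (n + 2 + 1) / 2 = (n + 1) / 2 + 1 := by omega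
    rw [h2, List.replicate_succ, List.flatten_cons]
    simp only [List.cons_append, List.nil_append, List.take_succ_cons, altList]
    rw [ih a b]

-- ===== VERDICT (by name: the statement is the Claim_ definition above) =====
theorem posmakera_spec : Claim_equal_posmakera := by
  intro servo posa posb _
  unfold Spec_posmakera posmakera posmakera_alt
  rw [PySem.List.foldl_append_singleton_eq_map, PySem.List.pyRange_one, List.map_map,
    List.nil_append]
  have hn : ((servo.length : Int) - 0).toNat = servo.length := by omega
  rw [hn]
  have hcomp : ((fun i => if PySem.Int.mod i 2 = 0 then posa else posb)
      ∘ fun (k : Nat) => (0 : Int) + (k : Int))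
      = fun (k : Nat) => if PySem.Int.mod ((0 : Int) + (k : Int)) 2 = 0 then posa else posb := rfl
  rw [hcomp, map_range_eq_alt]
  have hf : (PySem.Int.floordiv ((servo.length : Int) + 1) 2).toNat
      = (servo.length + 1) / 2 := by
    rw [PySem.Int.floordiv_eq_ediv_of_pos (by omega)]
    omega
  rw [PySem.List.slice_to_natCast, hf, take_flatten_eq_alt]
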